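-- pv_equiv track=rewrite | github.com/jeongminllee/ProgrammersCodeTest | 백준/Platinum/28068. I Am Knowledge/I Am Knowledge.py | can_read_all_books
-- ===== SOURCE A (Python) =====
-- def can_read_all_books(N, happy, unhappy) :
--     joy = 0
--
--     for a, b in happy + unhappy :
--         if joy < a :
--             return 0
--         joy -= a
--         joy += b
--
--     return 1
-- ===== SOURCE B (Python) =====
-- def can_read_all_books(N, happy, unhappy):
--     # Backward pass: minimal joy required immediately before reading the
--     # remaining books.  To read (a, b) then the rest, you need joy >= a and
--     # joy - a + b >= need(rest), i.e. joy >= max(a, need(rest) + a - b).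
--     need = None
--     for a, b in reversed(happy + unhappy):
--         need = a if need is None else max(a, need + a - b)
--     return 1 if need is None or need <= 0 else 0
-- ===== Notes on version B (the rewrite author's own statement) =====
-- stated objective: alternative
-- what changed: Replaces A's forward scan with a running joy counter by a backward pass computing the minimal initial joy required via need = max(a, need + a - b), then testing need <= 0.
import Mathlib
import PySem

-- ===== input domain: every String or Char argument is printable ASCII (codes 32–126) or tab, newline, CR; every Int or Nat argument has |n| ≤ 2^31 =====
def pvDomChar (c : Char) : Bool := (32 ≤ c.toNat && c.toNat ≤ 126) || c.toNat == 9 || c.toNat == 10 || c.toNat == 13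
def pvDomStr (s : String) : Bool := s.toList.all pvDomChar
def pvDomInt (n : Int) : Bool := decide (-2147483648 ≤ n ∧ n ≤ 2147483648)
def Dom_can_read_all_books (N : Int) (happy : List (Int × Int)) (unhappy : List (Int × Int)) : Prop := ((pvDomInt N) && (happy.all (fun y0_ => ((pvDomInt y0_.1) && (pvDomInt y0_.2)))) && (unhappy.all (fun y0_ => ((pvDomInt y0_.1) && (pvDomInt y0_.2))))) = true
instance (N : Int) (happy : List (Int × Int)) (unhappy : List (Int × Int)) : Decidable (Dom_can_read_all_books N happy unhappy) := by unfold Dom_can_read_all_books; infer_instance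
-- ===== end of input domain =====

-- ===== PORT A =====
-- B replaces A's forward joy-counter scan by a backward pass computing the minimal initial joy needed.
def pvReadLoop (joy : Int) (books : List (Int × Int)) : Int :=
  match books with
  | [] => 1
  | (a, b) :: rest => if joy < a then 0 else pvReadLoop (joy - a + b) rest

def can_read_all_books (N : Int) (happy : List (Int × Int)) (unhappy : List (Int × Int)) : Int :=
  pvReadLoop 0 (happy ++ unhappy)

-- ===== PORT B =====
-- minimal joy required before reading the books (none for the empty suffix);
-- recursion on the list from the front realises Source B's reversed-iteration accumulator.
def pvNeed (books : List (Int × Int)) : Option Int :=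
  match books with
  | [] => none
  | (a, b) :: rest =>
    match pvNeed rest with
    | none => some a
    | some n => some (max a (n + a - b))

def can_read_all_books_alt (N : Int) (happy : List (Int × Int)) (unhappy : List (Int × Int)) : Int :=
  match pvNeed (happy ++ unhappy) with
  | none => 1
  | some n => if n ≤ 0 then 1 else 0

-- ===== PRECONDITION & SPEC =====
def Spec_can_read_all_books (N : Int) (happy : List (Int × Int)) (unhappy : List (Int × Int)) (out : Int) : Prop := out = can_read_all_books_alt N happy unhappy
instance (N : Int) (happy : List (Int × Int)) (unhappy : List (Int × Int)) (out : Int) : Decidable (Spec_can_read_all_books N happy unhappy out) := by unfold Spec_can_read_all_books; infer_instance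

-- ===== CLAIM (what is proved, stated in full; the proofs are below) =====
def Claim_equal_can_read_all_books : Prop := ∀ (N : Int) (happy : List (Int × Int)) (unhappy : List (Int × Int)), Dom_can_read_all_books N happy unhappy → Spec_can_read_all_books N happy unhappy (can_read_all_books N happy unhappy)

-- ===== LEMMAS AND PROOFS =====
theorem pvLoop_eq_need (books : List (Int × Int)) : ∀ joy : Int,
    pvReadLoop joy books =
      (match pvNeed books with
       | none => 1
       | some n => if n ≤ joy then 1 else 0) := by
  induction books with
  | nil => intro joy; simp [pvReadLoop, pvNeed]
  | cons hd tl ih =>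
    intro joy
    obtain ⟨a, b⟩ := hd
    simp only [pvReadLoop, pvNeed]
    rw [ih (joy - a + b)]
    cases h : pvNeed tl with
    | none =>
      by_cases hja : joy < a
      · simp [hja, not_le.mpr hja]
      · simp [hja, not_lt.mp hja]
    | some n =>
      by_cases hja : joy < a
      · have : ¬ max a (n + a - b) ≤ joy := by omega
        simp [hja, this]
      · by_cases hn : n ≤ joy - a + b
        · have : max a (n + a - b) ≤ joy := by omega
          simp [hja, hn, this]
        · have : ¬ max a (n + a - b) ≤ joy := by omega
          simp [hja, hn, this]

-- ===== VERDICT (by name: the statement is the Claim_ definition above) =====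
theorem can_read_all_books_spec : Claim_equal_can_read_all_books := by
  intro N happy unhappy _
  unfold Spec_can_read_all_books can_read_all_books can_read_all_books_alt
  rw [pvLoop_eq_need (happy ++ unhappy) 0]
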